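-- pv_equiv track=rewrite | github.com/Weilory/sublime-noline | noline.py | disline
-- ===== SOURCE A (Python) =====
-- def disline(contents):
-- 	flag = True
-- 	result = ''
-- 	for letter in contents:
-- 		if(letter == '\n'):
-- 			if flag:
-- 				flag = False
-- 			else:
-- 				flag = True
-- 				result += letter
-- 		else:
-- 			flag = True
-- 			result += letter
-- 	return result
-- ===== SOURCE B (Python) =====
-- def disline(contents):
--     out = []
--     run = 0
--     for ch in contents:
--         if ch == '\n':
--             run += 1
--         else:
--             out.append('\n' * (run // 2))
--             out.append(ch)
--             run = 0
--     out.append('\n' * (run // 2))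
--     return ''.join(out)
-- ===== Notes on version B (the rewrite author's own statement) =====
-- stated objective: simpler
-- what changed: B collapses each maximal run of k consecutive newlines to k//2 newlines flushed once per run (run counter + join), instead of A's per-character boolean flag toggle with string concatenation.
import Mathlib
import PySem

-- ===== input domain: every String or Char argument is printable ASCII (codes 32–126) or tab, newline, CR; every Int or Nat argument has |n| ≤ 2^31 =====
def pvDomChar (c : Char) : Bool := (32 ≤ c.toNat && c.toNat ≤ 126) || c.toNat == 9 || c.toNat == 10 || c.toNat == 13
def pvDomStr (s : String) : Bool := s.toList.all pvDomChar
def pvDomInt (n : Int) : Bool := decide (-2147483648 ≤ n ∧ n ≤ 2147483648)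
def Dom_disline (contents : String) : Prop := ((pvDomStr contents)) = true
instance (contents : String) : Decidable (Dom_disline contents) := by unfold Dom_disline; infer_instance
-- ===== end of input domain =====

-- B collapses each maximal run of k newlines to k/2 newlines in one flush per run,
-- instead of A's per-character flag toggle (objective: simpler decomposition, same cost).

-- ===== PORT A =====
-- A's loop: state (flag, result); drop a '\n' when flag is true, else keep and reset.
def dislineGo : List Char → Bool → List Char → List Char
  | [], _, res => res
  | c :: cs, flag, res =>
    if c = '\n' then
      if flag then dislineGo cs false res
      else dislineGo cs true (res ++ ['\n'])
    else dislineGo cs true (res ++ [c])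

def disline (contents : String) : String :=
  String.ofList (dislineGo contents.toList true [])

-- ===== PORT B =====
-- B's loop: count the current newline run; flush run/2 newlines at each non-newline and at the end.
def dislineAltGo : List Char → Nat → List Char
  | [], run => List.replicate (run / 2) '\n'
  | c :: cs, run =>
    if c = '\n' then dislineAltGo cs (run + 1)
    else List.replicate (run / 2) '\n' ++ c :: dislineAltGo cs 0

def disline_alt (contents : String) : String :=
  String.ofList (dislineAltGo contents.toList 0)

-- ===== PRECONDITION & SPEC =====
def Spec_disline (contents : String) (out : String) : Prop := out = disline_alt contents
instance (contents : String) (out : String) : Decidable (Spec_disline contents out) := by unfold Spec_disline; infer_instance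

-- ===== CLAIM (what is proved, stated in full; the proofs are below) =====
def Claim_equal_disline : Prop := ∀ (contents : String), Dom_disline contents → Spec_disline contents (disline contents)

-- ===== LEMMAS AND PROOFS =====

-- Invariant: with k newlines of the current run consumed, A's flag is (k even) and
-- A's result already holds the k/2 newlines B will only flush later.
theorem dislineGo_eq (cs : List Char) : ∀ (k : Nat) (res : List Char),
    dislineGo cs (decide (k % 2 = 0)) (res ++ List.replicate (k / 2) '\n')
      = res ++ dislineAltGo cs k := by
  induction cs with
  | nil => intro k res; simp [dislineGo, dislineAltGo]
  | cons c cs ih =>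
    intro k res
    by_cases hc : c = '\n'
    · subst hc
      rcases Nat.even_or_odd k with he | ho
      · have hk : k % 2 = 0 := Nat.even_iff.mp he
        have hk1 : (k + 1) % 2 = 1 := by omega
        have hdiv : (k + 1) / 2 = k / 2 := by omega
        have := ih (k + 1) res
        simp only [hk1] at this
        simp only [dislineGo, dislineAltGo, hk, decide_eq_true_eq]
        simpa [hdiv] using this
      · have hk : k % 2 = 1 := Nat.odd_iff.mp ho
        have hk1 : (k + 1) % 2 = 0 := by omega
        have hdiv : (k + 1) / 2 = k / 2 + 1 := by omega
        have h2 := ih (k + 1) res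
        rw [hk1, hdiv, List.replicate_succ', ← List.append_assoc] at h2
        simp only [dislineGo, dislineAltGo, hk]
        simpa [List.append_assoc] using h2
    · have h2 := ih 0 (res ++ List.replicate (k / 2) '\n' ++ [c])
      simp only [Nat.zero_mod, Nat.zero_div, decide_true, List.replicate_zero,
        List.append_nil, List.append_assoc, List.singleton_append] at h2
      simp [dislineGo, dislineAltGo, hc, List.append_assoc, h2]

-- ===== VERDICT (by name: the statement is the Claim_ definition above) =====
theorem disline_spec : Claim_equal_disline := by
  intro contents _
  unfold Spec_disline disline disline_alt
  have h := dislineGo_eq contents.toList 0 []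
  simp only [Nat.zero_mod, Nat.zero_div, decide_true, List.replicate_zero,
    List.append_nil, List.nil_append] at h
  exact congrArg String.ofList h
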